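-- pv_equiv track=rewrite | github.com/fysoul17/devlyn-cli | config/skills/devlyn:auto-resolve/scripts/forbidden-pattern-check.py | slice_diff_to_files
-- ===== SOURCE A (Python) =====
-- def slice_diff_to_files(diff: str, files: list[str]) -> str:
--     """Return the subset of a unified diff touching any of `files`. Hunks
--     outside the allowlist are dropped. Mirrors run-fixture.sh:502-513."""
--     if not files:
--         return diff
--     out: list[str] = []
--     keep = False
--     for line in diff.splitlines(keepends=True):
--         if line.startswith("diff --git "):
--             keep = any(f in line for f in files)
--         if keep:
--             out.append(line)
--     return "".join(out)
-- ===== SOURCE B (Python) =====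
-- def slice_diff_to_files(diff: str, files: list[str]) -> str:
--     """Section-extent scanner: locate each 'diff --git ' header, scan its
--     section's extent, and emit the whole section iff the header line mentions
--     an allowlisted file (vs A's per-line boolean state machine)."""
--     if not files:
--         return diff
--     lines = diff.splitlines(keepends=True)
--     n = len(lines)
--     out: list[str] = []
--     i = 0
--     while i < n:
--         line = lines[i]
--         i += 1
--         if line.startswith("diff --git "):
--             start_body = i
--             while i < n and not lines[i].startswith("diff --git "):
--                 i += 1
--             if any(f in line for f in files):
--                 out.append(line)
--                 out.extend(lines[start_body:i])
--     return "".join(out)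
-- ===== Notes on version B (the rewrite author's own statement) =====
-- stated objective: alternative
-- what changed: Replaced A's per-line pass with a boolean 'keep' state by a section-extent scanner: find each 'diff --git ' header, scan forward to the next header to delimit the whole section, and emit the section only if its header line mentions an allowlisted file.
import Mathlib
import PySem

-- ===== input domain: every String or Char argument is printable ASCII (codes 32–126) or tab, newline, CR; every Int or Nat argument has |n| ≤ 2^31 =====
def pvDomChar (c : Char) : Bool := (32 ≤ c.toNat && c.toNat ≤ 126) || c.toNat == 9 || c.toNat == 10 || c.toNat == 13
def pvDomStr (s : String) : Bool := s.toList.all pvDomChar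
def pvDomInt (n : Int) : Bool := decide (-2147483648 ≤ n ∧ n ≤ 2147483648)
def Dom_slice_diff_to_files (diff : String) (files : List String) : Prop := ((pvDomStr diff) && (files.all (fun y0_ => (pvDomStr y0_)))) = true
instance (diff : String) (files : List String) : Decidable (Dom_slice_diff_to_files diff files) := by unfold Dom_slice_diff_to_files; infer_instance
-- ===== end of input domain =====

-- B is a section-extent scanner (header → extent → emit whole section) instead of A's per-line boolean state machine; same cost.

-- ===== PORT A =====
-- the header literal "diff --git " both Pythons test against
def pvHdr : List Char := "diff --git ".toList
-- CPython str.splitlines(keepends=True), ported by hand (PySem has no keepends variant);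
-- exact on Dom, where every line break is '\n', '\r' or '\r\n'.
def pvSplitKeep : List Char → List Char → List (List Char)
  | acc, [] => if acc = [] then [] else [acc.reverse]
  | acc, '\r' :: '\n' :: rest => (acc.reverse ++ ['\r', '\n']) :: pvSplitKeep [] rest
  | acc, '\r' :: rest => (acc.reverse ++ ['\r']) :: pvSplitKeep [] rest
  | acc, '\n' :: rest => (acc.reverse ++ ['\n']) :: pvSplitKeep [] rest
  | acc, c :: rest => pvSplitKeep (c :: acc) rest

-- A's for-loop: per-line pass carrying the boolean `keep` and the output list.
def pvLoopA (files : List String) : List (List Char) → Bool → List (List Char) → List (List Char)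
  | [], _, out => out
  | l :: rest, keep, out =>
    let keep' := if PySem.Chars.startswith l pvHdr
                 then files.any (fun f => PySem.Chars.isIn f.toList l) else keep
    pvLoopA files rest keep' (if keep' then out ++ [l] else out)

def slice_diff_to_files (diff : String) (files : List String) : String :=
  if files.isEmpty then diff
  else String.ofList (pvLoopA files (pvSplitKeep [] diff.toList) false []).flatten

-- ===== PORT B =====
-- Source B's inner while loop: collect the body lines up to the next header, return them and the rest.
def pvSectionBody : List (List Char) → List (List Char) × List (List Char)
  | [] => ([], [])
  | l :: rest =>
    if PySem.Chars.startswith l pvHdr then ([], l :: rest)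
    else (l :: (pvSectionBody rest).1, (pvSectionBody rest).2)

-- termination measure for pvFilter (cited by its decreasing_by)
theorem pvSectionBody_length_le (xs : List (List Char)) : (pvSectionBody xs).2.length ≤ xs.length := by
  induction xs with
  | nil => simp [pvSectionBody]
  | cons l rest ih =>
    rw [pvSectionBody]
    by_cases h : PySem.Chars.startswith l pvHdr
    · rw [if_pos h]
    · rw [if_neg (by simp [h])]
      simp only [List.length_cons]
      omega

-- Source B's outer while loop: scan for a header, delimit its section, emit it if allowlisted.
def pvFilter (files : List String) : List (List Char) → List (List Char)
  | [] => []
  | l :: rest =>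
    if PySem.Chars.startswith l pvHdr then
      (if files.any (fun f => PySem.Chars.isIn f.toList l) then l :: (pvSectionBody rest).1 else []) ++
        pvFilter files (pvSectionBody rest).2
    else pvFilter files rest
termination_by xs => xs.length
decreasing_by
  · have := pvSectionBody_length_le rest
    simp only [List.length_cons]
    omega
  · simp

def slice_diff_to_files_alt (diff : String) (files : List String) : String :=
  if files.isEmpty then diff
  else String.ofList (pvFilter files (pvSplitKeep [] diff.toList)).flatten

-- ===== PRECONDITION & SPEC =====
def Spec_slice_diff_to_files (diff : String) (files : List String) (out : String) : Prop := out = slice_diff_to_files_alt diff files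
instance (diff : String) (files : List String) (out : String) : Decidable (Spec_slice_diff_to_files diff files out) := by unfold Spec_slice_diff_to_files; infer_instance

-- ===== CLAIM (what is proved, stated in full; the proofs are below) =====
def Claim_equal_slice_diff_to_files : Prop := ∀ (diff : String) (files : List String), Dom_slice_diff_to_files diff files → Spec_slice_diff_to_files diff files (slice_diff_to_files diff files)

-- ===== LEMMAS AND PROOFS =====

-- A's loop only appends to `out`
theorem pvLoopA_out (files : List String) (lines : List (List Char)) :
    ∀ (keep : Bool) (out : List (List Char)),
    pvLoopA files lines keep out = out ++ pvLoopA files lines keep [] := by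
  induction lines with
  | nil => intro keep out; simp [pvLoopA]
  | cons l rest ih =>
    intro keep out
    simp only [pvLoopA]
    by_cases h : (if PySem.Chars.startswith l pvHdr
        then files.any (fun f => PySem.Chars.isIn f.toList l) else keep) = true
    · simp only [h, if_pos]
      rw [ih _ (out ++ [l]), ih _ ([] ++ [l])]
      simp
    · simp only [h]
      rw [if_neg (by simp)]
      rw [ih]
      simp

-- pvFilter skips leading non-header lines, so it is unchanged by dropping a section body
theorem pvFilter_sectionBody (files : List String) (xs : List (List Char)) :
    pvFilter files (pvSectionBody xs).2 = pvFilter files xs := by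
  induction xs with
  | nil => simp [pvSectionBody]
  | cons l rest ih =>
    by_cases h : PySem.Chars.startswith l pvHdr
    · simp [pvSectionBody, h]
    · simp only [pvSectionBody]
      rw [if_neg (by simp [h])]
      rw [ih]
      conv_rhs => rw [pvFilter]
      rw [if_neg (by simp [h])]

-- the core correspondence: A's state machine started with keep = false computes pvFilter,
-- and started with keep = true it first emits the current section body
theorem pvLoop_eq_filter (files : List String) (lines : List (List Char)) :
    pvLoopA files lines false [] = pvFilter files lines ∧
    pvLoopA files lines true [] = (pvSectionBody lines).1 ++ pvFilter files (pvSectionBody lines).2 := by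
  induction lines with
  | nil => simp [pvLoopA, pvFilter, pvSectionBody]
  | cons l rest ih =>
    by_cases h : PySem.Chars.startswith l pvHdr
    · -- header line: keep' is recomputed, so both starts coincide
      have hmain : ∀ keep : Bool, pvLoopA files (l :: rest) keep [] = pvFilter files (l :: rest) := by
        intro keep
        rw [pvLoopA]
        simp only [h, if_pos]
        conv_rhs => rw [pvFilter]
        rw [if_pos h]
        by_cases ha : files.any (fun f => PySem.Chars.isIn f.toList l) = true
        · rw [if_pos ha, if_pos ha, ha]
          rw [pvLoopA_out files rest true ([] ++ [l]), ih.2]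
          simp
        · rw [if_neg ha, if_neg ha]
          have ha' : (files.any (fun f => PySem.Chars.isIn f.toList l)) = false := by
            simpa using ha
          rw [ha']
          rw [ih.1, ← pvFilter_sectionBody files rest]
          simp
      refine ⟨hmain false, ?_⟩
      have hsec : pvSectionBody (l :: rest) = ([], l :: rest) := by
        rw [pvSectionBody, if_pos h]
      rw [hsec, hmain true]
      simp
    · -- non-header line: keep is carried through
      have hsec : pvSectionBody (l :: rest) = (l :: (pvSectionBody rest).1, (pvSectionBody rest).2) := by
        rw [pvSectionBody, if_neg (by simp [h])]
      constructor
      · rw [pvLoopA]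
        rw [if_neg (by simp [h]), if_neg (by simp)]
        rw [ih.1]
        conv_rhs => rw [pvFilter]
        rw [if_neg (by simp [h])]
      · rw [pvLoopA]
        rw [if_neg (by simp [h]), if_pos rfl]
        rw [pvLoopA_out files rest true ([] ++ [l]), ih.2, hsec]
        simp

-- ===== VERDICT (by name: the statement is the Claim_ definition above) =====
theorem slice_diff_to_files_spec : Claim_equal_slice_diff_to_files := by
  intro diff files _
  unfold Spec_slice_diff_to_files slice_diff_to_files slice_diff_to_files_alt
  by_cases hf : files.isEmpty
  · simp [hf]
  · rw [if_neg hf, if_neg hf]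
    rw [(pvLoop_eq_filter files (pvSplitKeep [] diff.toList)).1]
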